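-- pv_equiv track=rewrite | github.com/mohansiva58/tcscodevita-13 | six.py | apply_op
-- ===== SOURCE A (Python) =====
-- def apply_op(op, b_str, a_str=None):
--     """Applies the bitwise operation to the binary string(s)."""
--
--     if op == '!':
--         # Logical NOT (Unary)
--         result_bits = []
--         for bit in b_str:
--             result_bits.append('1' if bit == '0' else '0')
--         return "".join(result_bits)
--
--     # Binary operations (OR, AND). Must pad the shorter string to the length of the longer one.
--     len_a = len(a_str)
--     len_b = len(b_str)
--     max_len = max(len_a, len_b)
--
--     # Pad both strings with leading zeros to match max_len
--     a_padded = a_str.zfill(max_len)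
--     b_padded = b_str.zfill(max_len)
--
--     result_bits = []
--
--     for i in range(max_len):
--         bit_a = a_padded[i]
--         bit_b = b_padded[i]
--
--         if op == '|':
--             # OR: 1 if either is 1
--             result_bits.append('1' if bit_a == '1' or bit_b == '1' else '0')
--         elif op == '&':
--             # AND: 1 only if both are 1
--             result_bits.append('1' if bit_a == '1' and bit_b == '1' else '0')
--
--     return "".join(result_bits)
-- ===== SOURCE B (Python) =====
-- def _mask(s, one):
--     """Pack s into an integer bit mask: bit set where the character equals `one`."""
--     m = 0
--     for ch in s:
--         m = (m << 1) | (ch == one)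
--     return m
--
--
-- def apply_op(op, b_str, a_str=None):
--     """Applies the bitwise operation to the binary string(s)."""
--     if op == '!':
--         n = len(b_str)
--         return format(_mask(b_str, '0'), '0%db' % n) if n else ''
--     width = max(len(a_str), len(b_str))
--     if width == 0:
--         return ''
--     if op == '|':
--         v = _mask(a_str, '1') | _mask(b_str, '1')
--     elif op == '&':
--         v = _mask(a_str, '1') & _mask(b_str, '1')
--     else:
--         return ''
--     return format(v, '0%db' % width)
-- ===== Notes on version B (the rewrite author's own statement) =====
-- stated objective: alternative
-- what changed: Replaced A's per-position character pairing over zfill-padded strings by integer bit masks: each operand is packed into one integer ((m<<1)|bit), the masks are combined with a single machine bitwise operator (| or &, and a '0'-position mask for NOT), and the result is rendered with fixed-width zero-padded binary formatting.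
import Mathlib
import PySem

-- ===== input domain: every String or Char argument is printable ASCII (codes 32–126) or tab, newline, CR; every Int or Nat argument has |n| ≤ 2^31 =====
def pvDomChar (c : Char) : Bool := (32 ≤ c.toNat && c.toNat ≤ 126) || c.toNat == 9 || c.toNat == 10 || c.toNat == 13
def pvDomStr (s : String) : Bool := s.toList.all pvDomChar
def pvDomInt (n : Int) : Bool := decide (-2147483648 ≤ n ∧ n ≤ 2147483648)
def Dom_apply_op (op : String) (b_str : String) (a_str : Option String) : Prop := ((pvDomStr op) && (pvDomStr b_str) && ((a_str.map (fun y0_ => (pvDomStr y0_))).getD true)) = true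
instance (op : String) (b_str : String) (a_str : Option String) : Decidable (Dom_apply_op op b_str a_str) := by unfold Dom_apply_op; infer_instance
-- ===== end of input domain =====

-- B replaces A's per-character combining loops (and the zfill padding) by integer bit masks: each operand is packed into one integer, combined with a single machine bitwise operator (|, &, or the '0'-mask for NOT), and rendered back with fixed-width binary formatting (objective: alternative).

-- ===== PORT A =====
def apply_op (op : String) (b_str : String) (a_str : Option String) : String :=
  if op = "!" then
    String.ofList (b_str.toList.foldl (fun acc bit => acc ++ [if bit = '0' then '1' else '0']) [])
  else
    -- Python's len(a_str) raises TypeError when a_str is None; Pre_ excludes that, so getD "" is never reached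
    let a := (a_str.getD "").toList
    let b := b_str.toList
    let max_len := max a.length b.length
    let a_padded := PySem.Chars.zfill a (max_len : Int)
    let b_padded := PySem.Chars.zfill b (max_len : Int)
    let result_bits := (List.range max_len).foldl (fun acc i =>
      -- i < max_len is in range of both padded lists, so getD's default is never used
      let bit_a := a_padded.getD i ' '
      let bit_b := b_padded.getD i ' '
      if op = "|" then acc ++ [if bit_a = '1' ∨ bit_b = '1' then '1' else '0']
      else if op = "&" then acc ++ [if bit_a = '1' ∧ bit_b = '1' then '1' else '0']
      else acc) []
    String.ofList result_bits

-- ===== PORT B =====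
-- _mask(s, one): pack s into an integer bit mask, bit set where the character equals `one`
def pvMask (s : List Char) (one : Char) : Nat :=
  s.foldl (fun m ch => (m <<< 1) ||| (if ch = one then 1 else 0)) 0

-- binary digits of v, most significant first, [] for 0 (helper for format(v, '0nb'))
def pvBinDigits : Nat → List Char
  | 0 => []
  | v + 1 => pvBinDigits ((v + 1) / 2) ++ [if (v + 1) % 2 = 1 then '1' else '0']
decreasing_by omega

-- format(v, '0nb'): binary of v, left-padded with '0' to width n; exact for v ≥ 0
def pvFmtBin (v n : Nat) : List Char :=
  let d := if v = 0 then ['0'] else pvBinDigits v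
  List.replicate (n - d.length) '0' ++ d

def apply_op_alt (op : String) (b_str : String) (a_str : Option String) : String :=
  if op = "!" then
    let n := b_str.toList.length
    if n = 0 then "" else String.ofList (pvFmtBin (pvMask b_str.toList '0') n)
  else
    -- Python's len(a_str) raises TypeError when a_str is None; Pre_ excludes that, so getD "" is never reached
    let a := (a_str.getD "").toList
    let b := b_str.toList
    let width := max a.length b.length
    if width = 0 then "" else
      if op = "|" then String.ofList (pvFmtBin ((pvMask a '1') ||| (pvMask b '1')) width)
      else if op = "&" then String.ofList (pvFmtBin ((pvMask a '1') &&& (pvMask b '1')) width)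
      else ""

-- ===== PRECONDITION & SPEC =====
-- Pre_ excludes only the inputs where Python A raises: a_str = None with a non-'!' op (TypeError from len(None)).
def Pre_apply_op (op : String) (b_str : String) (a_str : Option String) : Prop := op = "!" ∨ a_str ≠ none
instance (op : String) (b_str : String) (a_str : Option String) : Decidable (Pre_apply_op op b_str a_str) := by unfold Pre_apply_op; infer_instance
def pvWitness_apply_op : String × String × Option String := ("|", "10", some "1")

def Spec_apply_op (op : String) (b_str : String) (a_str : Option String) (out : String) : Prop := out = apply_op_alt op b_str a_str
instance (op : String) (b_str : String) (a_str : Option String) (out : String) : Decidable (Spec_apply_op op b_str a_str out) := by unfold Spec_apply_op; infer_instance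

-- ===== CLAIM (what is proved, stated in full; the proofs are below) =====
def Claim_equal_apply_op : Prop := ∀ (op : String) (b_str : String) (a_str : Option String), Dom_apply_op op b_str a_str → Pre_apply_op op b_str a_str → Spec_apply_op op b_str a_str (apply_op op b_str a_str)

-- ===== LEMMAS AND PROOFS =====

-- "l is a string of '0'/'1' characters" (the shape of both programs' OUTPUTS)
def pvBin (l : List Char) : Prop := ∀ c ∈ l, c = '0' ∨ c = '1'

-- the '1'-mask of a list, in foldl-arithmetic form (proof-side mirror of pvMask l '1')
def pvParseBin (l : List Char) : Nat :=
  l.foldl (fun acc c => 2 * acc + (if c = '1' then 1 else 0)) 0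

-- a foldl that only pushes one element per step is a map
theorem pv_foldl_push {α β : Type} (l : List α) (f : α → β) (acc : List β) :
    l.foldl (fun a x => a ++ [f x]) acc = acc ++ l.map f := by
  induction l generalizing acc with
  | nil => simp
  | cons c t ih => simp [List.foldl_cons, ih]

theorem pv_foldl_id {α β : Type} (l : List α) (acc : β) :
    l.foldl (fun a _ => a) acc = acc := by
  induction l generalizing acc with
  | nil => rfl
  | cons c t ih => simpa using ih acc

theorem pv_parse_append (t : List Char) (c : Char) :
    pvParseBin (t ++ [c]) = 2 * pvParseBin t + (if c = '1' then 1 else 0) := by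
  simp [pvParseBin, List.foldl_append]

theorem pv_getD_rangemap (g : Nat → Char) (n i : Nat) (h : i < n) :
    ((List.range n).map g).getD i ' ' = g i := by
  simp [List.getD, List.getElem?_map, List.getElem?_range, h]

theorem pv_getD_map (f : Char → Char) (l : List Char) (i : Nat) (h : i < l.length) :
    (l.map f).getD i ' ' = f (l.getD i ' ') := by
  simp [List.getD, List.getElem?_map, List.getElem?_eq_getElem h]

-- (m << 1) | b = 2*m + b for b ≤ 1 (the or-ed bit lands in the cleared low bit)
theorem pv_shift_or (m u : Nat) (hu : u ≤ 1) : (m <<< 1) ||| u = 2 * m + u := by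
  interval_cases u
  · simp [Nat.shiftLeft_eq, Nat.mul_comm]
  · apply Nat.eq_of_testBit_eq
    intro j
    cases j with
    | zero => simp [Nat.testBit_lor, Nat.testBit_zero, Nat.shiftLeft_eq, Nat.mul_comm, Nat.add_mul_mod_self_left]
    | succ i =>
      rw [Nat.testBit_lor, Nat.testBit_succ, Nat.testBit_succ, Nat.testBit_succ]
      have h1 : (m <<< 1) / 2 = m := by rw [Nat.shiftLeft_eq]; omega
      have h2 : (2 * m + 1) / 2 = m := by omega
      have h3 : (1 : Nat) / 2 = 0 := by norm_num
      rw [h1, h2, h3]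
      simp [Nat.zero_testBit]

theorem pv_mask_eq (s : List Char) (one : Char) :
    pvMask s one = s.foldl (fun m ch => 2 * m + (if ch = one then 1 else 0)) 0 := by
  unfold pvMask
  have hf : (fun (m : Nat) ch => (m <<< 1) ||| (if ch = one then 1 else 0))
      = fun (m : Nat) ch => 2 * m + (if ch = one then 1 else 0) := by
    funext m ch
    exact pv_shift_or m _ (by split <;> omega)
  rw [hf]

theorem pv_fold_append (t : List Char) (c : Char) (one : Char) :
    (t ++ [c]).foldl (fun m ch => 2 * m + (if ch = one then 1 else 0)) 0
      = 2 * t.foldl (fun m ch => 2 * m + (if ch = one then 1 else 0)) 0 + (if c = one then 1 else 0) := by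
  simp [List.foldl_append]

theorem pv_mask_testBit (one : Char) (l : List Char) (j : Nat) :
    (l.foldl (fun m ch => 2 * m + (if ch = one then 1 else 0)) 0).testBit j
      = (decide (j < l.length) && decide (l.getD (l.length - 1 - j) ' ' = one)) := by
  induction l using List.reverseRecOn generalizing j with
  | nil => simp [Nat.zero_testBit]
  | append_singleton t c ih =>
    rw [pv_fold_append]
    set u : Nat := if c = one then 1 else 0 with hu
    have hu1 : u ≤ 1 := by rw [hu]; split <;> omega
    set a : Nat := t.foldl (fun m ch => 2 * m + (if ch = one then 1 else 0)) 0 with ha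
    cases j with
    | zero =>
      rw [Nat.testBit_zero]
      have hmod : (2 * a + u) % 2 = u := by omega
      have hlen : (t ++ [c]).length - 1 - 0 = t.length := by simp
      rw [hmod, hlen]
      have hgd : (t ++ [c]).getD t.length ' ' = c := by simp
      rw [hgd]
      by_cases h' : c = one <;> simp [h', hu]
    | succ i =>
      rw [Nat.testBit_succ]
      have hdiv : (2 * a + u) / 2 = a := by omega
      rw [hdiv, ih]
      by_cases hi : i < t.length
      · have hlt : i + 1 < (t ++ [c]).length := by simp; omega
        have hidx : (t ++ [c]).length - 1 - (i + 1) = t.length - 1 - i := by simp; omega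
        have hidx2 : t.length - 1 - i < t.length := by omega
        have hgd : (t ++ [c]).getD (t.length - 1 - i) ' ' = t.getD (t.length - 1 - i) ' ' := by
          simp [List.getD, List.getElem?_append_left hidx2]
        rw [hidx, hgd]
        simp [hi]
      · have hlt : ¬ (i + 1 < (t ++ [c]).length) := by simp; omega
        simp [hi, hlt]

-- the '1'-positions of the zfill-padded string, in terms of the original string
theorem pv_zfill_bit (l : List Char) (n j : Nat) (hj : j < n) :
    ((PySem.Chars.zfill l (n : Int)).getD j ' ' = '1')
      ↔ (n - l.length ≤ j ∧ l.getD (j - (n - l.length)) ' ' = '1') := by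
  unfold PySem.Chars.zfill
  by_cases hle : (n : Int) ≤ (l.length : Int)
  · have hle' : l.length ≥ n := by exact_mod_cast hle
    rw [if_pos hle]
    have h0 : n - l.length = 0 := by omega
    simp [h0]
  · have hgt : l.length < n := by
      have := lt_of_not_ge (fun h => hle (by exact_mod_cast h))
      exact_mod_cast this
    rw [if_neg hle]
    cases l with
    | nil =>
      simp only [Int.toNat_natCast]
      constructor
      · intro h
        exfalso
        have : (List.replicate n '0').getD j ' ' = '0' := by
          simp [List.getD, List.getElem?_replicate, hj]
        rw [this] at h
        exact absurd h (by decide)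
      · rintro ⟨h1, -⟩
        simp at h1 hgt
        omega
    | cons c rest =>
      dsimp only
      by_cases hsgn : c = '+' ∨ c = '-'
      · rw [if_pos hsgn]
        simp only [Int.toNat_natCast]
        set L := (c :: rest).length with hL
        have hLpos : 0 < L := by simp [hL]
        cases j with
        | zero =>
          have hgd : (c :: (List.replicate (n - L) '0' ++ rest)).getD 0 ' ' = c := by simp
          rw [hgd]
          constructor
          · intro h; exact absurd h (by rcases hsgn with h'|h' <;> simp [h'])
          · rintro ⟨h1, -⟩; omega
        | succ i =>
          have hgd : (c :: (List.replicate (n - L) '0' ++ rest)).getD (i+1) ' '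
              = (List.replicate (n - L) '0' ++ rest).getD i ' ' := by simp [List.getD]
          rw [hgd]
          by_cases hi : i < n - L
          · have hgd2 : (List.replicate (n - L) '0' ++ rest).getD i ' ' = '0' := by
              simp [List.getD, List.getElem?_append_left (by simp [hi] : i < (List.replicate (n - L) '0').length), List.getElem?_replicate, hi]
            rw [hgd2]
            constructor
            · intro h; exact absurd h (by decide)
            · rintro ⟨h1, h2⟩
              -- n - L ≤ i + 1 and i < n - L force i + 1 = n - L, so the source index is 0: the sign char
              have hidx : i + 1 - (n - L) = 0 := by omega
              rw [hidx] at h2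
              have : (c :: rest).getD 0 ' ' = c := by simp
              rw [this] at h2
              exact absurd h2 (by rcases hsgn with h'|h' <;> simp [h'])
          · have hplen : i ≥ (List.replicate (n - L) '0').length := by simp; omega
            have hgd2 : (List.replicate (n - L) '0' ++ rest).getD i ' '
                = rest.getD (i - (n - L)) ' ' := by
              simp [List.getD, List.getElem?_append_right hplen]
            have hgd3 : (c :: rest).getD (i + 1 - (n - L)) ' ' = rest.getD (i - (n - L)) ' ' := by
              have : i + 1 - (n - L) = (i - (n - L)) + 1 := by omega
              rw [this]
              simp [List.getD]
            rw [hgd2, hgd3]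
            constructor
            · intro h; exact ⟨by omega, h⟩
            · rintro ⟨-, h⟩; exact h
      · rw [if_neg hsgn]
        simp only [Int.toNat_natCast]
        set L := (c :: rest).length with hL
        by_cases hi : j < n - L
        · have hgd : (List.replicate (n - L) '0' ++ c :: rest).getD j ' ' = '0' := by
            simp [List.getD, List.getElem?_append_left (by simp [hi] : j < (List.replicate (n - L) '0').length), List.getElem?_replicate, hi]
          rw [hgd]
          constructor
          · intro h; exact absurd h (by decide)
          · rintro ⟨h1, -⟩; omega
        · have hplen : j ≥ (List.replicate (n - L) '0').length := by simp; omega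
          have hgd : (List.replicate (n - L) '0' ++ c :: rest).getD j ' '
              = (c :: rest).getD (j - (n - L)) ' ' := by
            simp [List.getD, List.getElem?_append_right hplen]
          rw [hgd]
          constructor
          · intro h; exact ⟨by omega, h⟩
          · rintro ⟨-, h⟩; exact h

theorem pv_pad_bit (l : List Char) (n j : Nat) (hlen : l.length ≤ n) (hj : j < n) :
    decide ((PySem.Chars.zfill l (n : Int)).getD (n - 1 - j) ' ' = '1')
      = (decide (j < l.length) && decide (l.getD (l.length - 1 - j) ' ' = '1')) := by
  have h := pv_zfill_bit l n (n - 1 - j) (by omega)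
  by_cases hjl : j < l.length
  · have hidx : n - 1 - j - (n - l.length) = l.length - 1 - j := by omega
    rw [hidx] at h
    have hge : n - l.length ≤ n - 1 - j := by omega
    simp only [hge, true_and] at h
    simp only [hjl, decide_true, Bool.true_and]
    exact decide_eq_decide.mpr h
  · have hng : ¬ (n - l.length ≤ n - 1 - j) := by omega
    simp only [hng, false_and] at h
    have hnot : ¬ ((PySem.Chars.zfill l (n : Int)).getD (n - 1 - j) ' ' = '1') := fun hx => (h.mp hx).elim
    simp only [hjl, decide_false, Bool.false_and]
    exact decide_eq_false hnot

theorem pvBinDigits_ne (v : Nat) (hv : v ≠ 0) :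
    pvBinDigits v = pvBinDigits (v / 2) ++ [if v % 2 = 1 then '1' else '0'] := by
  cases v with
  | zero => exact absurd rfl hv
  | succ w => rw [pvBinDigits]

theorem pv_parse_zero (l : List Char) (h : pvBin l) (h0 : pvParseBin l = 0) :
    l = List.replicate l.length '0' := by
  induction l using List.reverseRecOn with
  | nil => rfl
  | append_singleton t c ih =>
    rw [pv_parse_append] at h0
    have hbt : pvBin t := fun x hx => h x (by simp [hx])
    have hc := h c (by simp)
    have ht0 : pvParseBin t = 0 := by omega
    have hcu : (if c = '1' then 1 else 0) = 0 := by omega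
    have hc0 : c = '0' := by rcases hc with h' | h' <;> simp [h'] at hcu ⊢
    rw [ih hbt ht0, hc0]
    simp [List.replicate_succ']

theorem pv_fmt_inv (l : List Char) (h : pvBin l) (hne : l ≠ []) :
    pvFmtBin (pvParseBin l) l.length = l := by
  induction l using List.reverseRecOn with
  | nil => exact absurd rfl hne
  | append_singleton t c ih =>
    have hbt : pvBin t := fun x hx => h x (by simp [hx])
    have hc := h c (by simp)
    rw [pv_parse_append]
    by_cases ht0 : pvParseBin t = 0
    · have htz : t = List.replicate t.length '0' := pv_parse_zero t hbt ht0
      rcases hc with h' | h' <;>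
        · subst h'
          rw [ht0]
          simp only [pvFmtBin]
          rw [htz]
          simp [pvBinDigits, List.replicate_succ']
    · have hv : 2 * pvParseBin t + (if c = '1' then 1 else 0) ≠ 0 := by omega
      have hne2 : t ≠ [] := by
        intro he; rw [he] at ht0; exact ht0 rfl
      have hdig : pvBinDigits (2 * pvParseBin t + (if c = '1' then 1 else 0))
          = pvBinDigits (pvParseBin t) ++ [c] := by
        rw [pvBinDigits_ne _ hv]
        have hdiv : (2 * pvParseBin t + (if c = '1' then 1 else 0)) / 2 = pvParseBin t := by
          split <;> omega
        have hmod : (2 * pvParseBin t + (if c = '1' then 1 else 0)) % 2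
            = (if c = '1' then 1 else 0) := by split <;> omega
        rw [hdiv, hmod]
        rcases hc with h' | h' <;> simp [h']
      simp only [pvFmtBin, if_neg hv, if_neg ht0] at *
      rw [hdig]
      have := ih hbt hne2
      simp only [List.length_append, List.length_singleton]
      have harith : t.length + 1 - ((pvBinDigits (pvParseBin t)).length + 1)
          = t.length - (pvBinDigits (pvParseBin t)).length := by omega
      simp only [List.length_append, List.length_singleton, harith]
      rw [← List.append_assoc]
      rw [show List.replicate (t.length - (pvBinDigits (pvParseBin t)).length) '0' ++ pvBinDigits (pvParseBin t) = t from this]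

-- v's bits are exactly r's characters ⇒ formatting v at width n gives back r
theorem pv_core (r : List Char) (n : Nat) (hb : pvBin r) (hl : r.length = n) (hn : 0 < n)
    (v : Nat)
    (hv : ∀ j, v.testBit j = (decide (j < n) && decide (r.getD (n - 1 - j) ' ' = '1'))) :
    pvFmtBin v n = r := by
  have hne : r ≠ [] := by intro he; subst he; simp at hl; omega
  have hveq : v = pvParseBin r := by
    apply Nat.eq_of_testBit_eq
    intro j
    rw [hv j, ← hl]
    exact (pv_mask_testBit '1' r j).symm
  rw [hveq, ← hl, pv_fmt_inv r hb hne]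

theorem pv_main (op : String) (b_str : String) (a_str : Option String)
    (hrest : op = "!" ∨ ∃ s, a_str = some s) :
    apply_op op b_str a_str = apply_op_alt op b_str a_str := by
  by_cases hop : op = "!"
  · subst hop
    simp only [apply_op, apply_op_alt, if_pos rfl]
    rw [pv_foldl_push, List.nil_append]
    set b := b_str.toList with hbdef
    by_cases hn : b.length = 0
    · have hbe : b = [] := List.eq_nil_of_length_eq_zero hn
      rw [if_pos hn, hbe]
      rfl
    · rw [if_neg hn]
      refine congrArg String.ofList ?_
      have hlen : (b.map (fun bit => if bit = '0' then '1' else '0')).length = b.length := by simp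
      refine (pv_core _ b.length ?_ hlen (by omega) _ ?_).symm
      · intro c hc
        rcases List.mem_map.mp hc with ⟨x, _, rfl⟩
        split <;> simp
      · intro j
        rw [pv_mask_eq, pv_mask_testBit '0' b j]
        by_cases hj : j < b.length
        · have hidx : b.length - 1 - j < b.length := by omega
          rw [pv_getD_map _ _ _ hidx]
          by_cases h0 : b.getD (b.length - 1 - j) ' ' = '0' <;> simp [h0, hj]
        · simp [hj]
  · rcases hrest with h' | ⟨s, rfl⟩
    · exact absurd h' hop
    simp only [apply_op, apply_op_alt, if_neg hop, Option.getD_some]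
    set a := s.toList with hadef
    set b := b_str.toList with hbdef
    set n := max a.length b.length with hndef
    have hal : a.length ≤ n := by rw [hndef]; exact Nat.le_max_left _ _
    have hbl : b.length ≤ n := by rw [hndef]; exact Nat.le_max_right _ _
    set ap := PySem.Chars.zfill a (n : Int) with hapdef
    set bp := PySem.Chars.zfill b (n : Int) with hbpdef
    by_cases hn0 : n = 0
    · rw [if_pos hn0]
      have hrange : List.range n = [] := by rw [hn0, List.range_zero]
      rw [hrange]
      rfl
    · rw [if_neg hn0]
      by_cases hor : op = "|"
      · subst hor
        simp only [String.reduceEq, reduceIte]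
        rw [pv_foldl_push, List.nil_append]
        refine congrArg String.ofList ?_
        set g : Nat → Char := fun i =>
          if ap.getD i ' ' = '1' ∨ bp.getD i ' ' = '1' then '1' else '0' with hgdef
        have hlen : ((List.range n).map g).length = n := by simp
        refine (pv_core _ n ?_ hlen (by omega) _ ?_).symm
        · intro c hc
          rcases List.mem_map.mp hc with ⟨x, _, rfl⟩
          simp only [hgdef]
          split <;> simp
        · intro j
          rw [Nat.testBit_lor, pv_mask_eq, pv_mask_eq,
              pv_mask_testBit '1' a j, pv_mask_testBit '1' b j]
          by_cases hj : j < n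
          · rw [pv_getD_rangemap g n _ (by omega)]
            simp only [hgdef]
            rw [← pv_pad_bit a n j hal hj, ← pv_pad_bit b n j hbl hj, ← hapdef, ← hbpdef]
            by_cases h1 : ap.getD (n - 1 - j) ' ' = '1' <;>
              by_cases h2 : bp.getD (n - 1 - j) ' ' = '1' <;>
                simp [h1, h2, hj]
          · have hja : ¬ j < a.length := by omega
            have hjb : ¬ j < b.length := by omega
            simp [hj, hja, hjb]
      · by_cases hand : op = "&"
        · subst hand
          simp only [String.reduceEq, reduceIte]
          rw [pv_foldl_push, List.nil_append]
          refine congrArg String.ofList ?_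
          set g : Nat → Char := fun i =>
            if ap.getD i ' ' = '1' ∧ bp.getD i ' ' = '1' then '1' else '0' with hgdef
          have hlen : ((List.range n).map g).length = n := by simp
          refine (pv_core _ n ?_ hlen (by omega) _ ?_).symm
          · intro c hc
            rcases List.mem_map.mp hc with ⟨x, _, rfl⟩
            simp only [hgdef]
            split <;> simp
          · intro j
            rw [Nat.testBit_land, pv_mask_eq, pv_mask_eq,
                pv_mask_testBit '1' a j, pv_mask_testBit '1' b j]
            by_cases hj : j < n
            · rw [pv_getD_rangemap g n _ (by omega)]
              simp only [hgdef]
              rw [← pv_pad_bit a n j hal hj, ← pv_pad_bit b n j hbl hj, ← hapdef, ← hbpdef]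
              by_cases h1 : ap.getD (n - 1 - j) ' ' = '1' <;>
                by_cases h2 : bp.getD (n - 1 - j) ' ' = '1' <;>
                  simp [h1, h2, hj]
            · have hja : ¬ j < a.length := by omega
              simp [hj, hja]
        · simp only [if_neg hor, if_neg hand]
          rw [pv_foldl_id]

-- ===== VERDICT (by name: the statement is the Claim_ definition above) =====
theorem apply_op_spec : Claim_equal_apply_op := by
  intro op b_str a_str _ hpre
  unfold Spec_apply_op
  apply pv_main
  rcases hpre with h | h
  · exact Or.inl h
  · cases a_str with
    | none => exact absurd rfl h
    | some s => exact Or.inr ⟨s, rfl⟩
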